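-- pv_equiv track=rewrite | github.com/longhoag/3110-Project | python-logic-draft.py | check_octal
-- ===== SOURCE A (Python) =====
-- def pre_check(input):
--
--     #clean input
--     input = input.strip()
--
--     #empty input string handling
--     if not input:
--         return False
--
-- def check_octal(input):
--     pre_check(input)
--
--     # _ would not be the last digit
--     if input[len(input) - 1] in '_':
--         return False
--
--     # _ would not be next to together
--     for i, digit in enumerate(input):
--         if digit in ('_'):
--             if input[i - 1] in '_' or input[i + 1] in '_':
--                 return False
--
--     # octal integer format: 0o177, 0O234, ...
--     if input[0] == '0':
--         if len(input) > 2 and input[1] in 'oO':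
--             input = input[2:]
--         else:
--             return False
--     else:
--         return False
--
--     #check each digit
--     for digit in input:
--         if digit not in '01234567_':
--             return False
--
--
--     return True
-- ===== SOURCE B (Python) =====
-- def check_octal(input):
--     # single-pass DFA: mandatory 0o/0O prefix, then digits with single separating underscores
--     if len(input) < 3 or input[0] != '0' or input[1] not in 'oO':
--         return False
--     allow_us = True  # an underscore is permitted right after the prefix
--     for ch in input[2:]:
--         if ch == '_':
--             if not allow_us:
--                 return False
--             allow_us = False
--         elif ch in '01234567':
--             allow_us = True
--         else:
--             return False
--     return allow_us
-- ===== Notes on version B (the rewrite author's own statement) =====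
-- stated objective: simpler
-- what changed: A makes three separate passes (trailing-underscore check, indexed neighbour scan via enumerate, then a digit scan over the sliced body); B is a single left-to-right DFA over the body with one boolean state recording whether an underscore may appear, which subsumes all three checks in one pass and exits early on a bad prefix.
import Mathlib
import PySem

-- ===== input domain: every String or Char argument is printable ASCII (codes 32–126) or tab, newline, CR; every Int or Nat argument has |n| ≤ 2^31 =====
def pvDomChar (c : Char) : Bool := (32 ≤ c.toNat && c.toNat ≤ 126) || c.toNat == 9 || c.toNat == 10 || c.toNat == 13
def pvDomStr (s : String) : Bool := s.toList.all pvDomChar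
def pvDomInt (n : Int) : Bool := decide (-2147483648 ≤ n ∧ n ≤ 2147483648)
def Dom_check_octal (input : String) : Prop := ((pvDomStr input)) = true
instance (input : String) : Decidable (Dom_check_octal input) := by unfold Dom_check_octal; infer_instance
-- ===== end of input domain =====

-- B replaces A's three separate passes (trailing-underscore check, enumerate neighbour scan, digit scan)
-- by a single left-to-right scan with one boolean state; equivalence is proved on Pre_ (all non-empty
-- strings; A raises IndexError on the empty string, B returns False there).


-- ===== PORT A =====
-- pre_check: strips and returns False on emptiness; its result is discarded by check_octal
def pre_check (input : String) : Option Bool :=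
  let s := PySem.Str.strip input
  if PySem.Str.len s == 0 then some false else none

-- the 'for i, digit in enumerate(input)' loop; 'x in '_'' is x == '_'.
-- input[i-1] (negative wrap) and input[i+1] via pyGet?; Python's input[i+1] can only be
-- out of range when the last char is '_', which check_octal has already rejected, so
-- 'pyGet? = none' (compared ≠ some '_') is never reached where Python would raise.
def aAdjLoop (cs : List Char) : List (Int × Char) → Bool
  | [] => true
  | (i, digit) :: rest =>
    if digit == '_' then
      if PySem.List.pyGet? cs (i - 1) == some '_' || PySem.List.pyGet? cs (i + 1) == some '_' then
        false
      else aAdjLoop cs rest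
    else aAdjLoop cs rest

-- the final 'for digit in input' loop ('digit not in '01234567_'' is char membership)
def aDigits : List Char → Bool
  | [] => true
  | d :: rest => if !("01234567_".toList.contains d) then false else aDigits rest

def check_octal (input : String) : Bool :=
  let _ := pre_check input
  let cs := input.toList
  -- input[len(input) - 1]: IndexError exactly on the empty string (excluded by Pre_)
  match PySem.List.pyGet? cs ((cs.length : Int) - 1) with
  | none => false
  | some lastc =>
    if lastc == '_' then false
    else if !(aAdjLoop cs (PySem.List.enumerate cs 0)) then false
    else
      match PySem.List.pyGet? cs 0 with
      | none => false  -- unreachable here: cs ≠ []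
      | some c0 =>
        if c0 == '0' then
          if cs.length > 2 then            -- short-circuit of 'len(input) > 2 and input[1] in 'oO''
            match PySem.List.pyGet? cs 1 with
            | none => false                -- unreachable: length > 2
            | some c1 =>
              if "oO".toList.contains c1 then
                aDigits (PySem.List.slice cs (some 2) none)   -- input = input[2:], then the digit loop
              else false
          else false
        else false

-- ===== PORT B =====
-- the DFA loop over input[2:]; the flag records whether an underscore may appear next
def altBody : Bool → List Char → Bool
  | allow, [] => allow
  | allow, ch :: rest =>
    if ch == '_' then
      if !allow then false else altBody false rest
    else if "01234567".toList.contains ch then altBody true rest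
    else false

def check_octal_alt (input : String) : Bool :=
  let cs := input.toList
  if cs.length < 3 then false
  else
    match cs with
    | c0 :: c1 :: rest =>
      if c0 != '0' then false
      else if !("oO".toList.contains c1) then false
      else altBody true rest
    | _ => false   -- unreachable: length ≥ 3

-- ===== PRECONDITION & SPEC =====
-- Pre_ excludes only the empty string, on which A raises IndexError at input[len(input)-1].
def Pre_check_octal (input : String) : Prop := input.toList ≠ []
instance (input : String) : Decidable (Pre_check_octal input) := by unfold Pre_check_octal; infer_instance

def pvWitness_check_octal : String := "0o17"

def Spec_check_octal (input : String) (out : Bool) : Prop := out = check_octal_alt input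
instance (input : String) (out : Bool) : Decidable (Spec_check_octal input out) := by unfold Spec_check_octal; infer_instance

-- ===== CLAIM (what is proved, stated in full; the proofs are below) =====
def Claim_equal_check_octal : Prop := ∀ (input : String), Dom_check_octal input → Pre_check_octal input → Spec_check_octal input (check_octal input)

-- ===== LEMMAS AND PROOFS =====

-- spec predicates both loops are reduced to
def noDD : List Char → Bool
  | a :: b :: t => if a == '_' && b == '_' then false else noDD (b :: t)
  | _ => true

def lastNotUs : List Char → Bool
  | [] => true
  | [c] => c != '_'
  | _ :: c :: t => lastNotUs (c :: t)

def headNotUs : List Char → Bool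
  | [] => true
  | c :: _ => c != '_'

lemma lastNotUs_eq (l : List Char) : lastNotUs l = !(l.getLast? == some '_') := by
  induction l with
  | nil => rfl
  | cons a t ih =>
    cases t with
    | nil => simp [lastNotUs, bne]
    | cons b t' =>
      rw [show lastNotUs (a :: b :: t') = lastNotUs (b :: t') from rfl, ih,
        List.getLast?_cons_cons]

lemma aDigits_cons (c : Char) (t : List Char) :
    aDigits (c :: t) = ("01234567_".toList.contains c && aDigits t) := by
  by_cases h : "01234567_".toList.contains c = true <;> simp [aDigits, h]


lemma contains_all_eq (d : Char) :
    "01234567_".toList.contains d = ((d == '_') || "01234567".toList.contains d) := by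
  by_cases h : d = '_'
  · subst h; decide
  · simp [List.contains_eq_mem, h]

-- characterisation of B's DFA loop
lemma altBody_spec (l : List Char) :
    altBody true l = (lastNotUs l && noDD l && aDigits l) ∧
    altBody false l = (!l.isEmpty && headNotUs l && lastNotUs l && noDD l && aDigits l) := by
  induction l with
  | nil => exact ⟨rfl, rfl⟩
  | cons c t ih =>
    obtain ⟨iht, ihf⟩ := ih
    by_cases hc : c = '_'
    · subst hc
      refine ⟨?_, by simp [altBody, headNotUs]⟩
      rw [show altBody true ('_' :: t) = altBody false t from rfl, ihf]
      cases t with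
      | nil => simp [lastNotUs]
      | cons d t' =>
        rw [show lastNotUs ('_' :: d :: t') = lastNotUs (d :: t') from rfl,
          aDigits_cons '_' (d :: t'),
          show ("01234567_".toList.contains '_') = true from by decide]
        simp only [noDD, headNotUs, List.isEmpty_cons, Bool.not_false, Bool.true_and,
          beq_self_eq_true]
        by_cases hd : d = '_' <;>
          cases hL : lastNotUs (d :: t') <;> cases hN : noDD (d :: t') <;>
            cases hA : aDigits (d :: t') <;> simp [hd]
    · have hne : (c == '_') = false := by simp [hc]
      by_cases hdig : "01234567".toList.contains c = true
      · have hT : altBody true (c :: t) = altBody true t := by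
          simp only [altBody, hne, hdig, Bool.false_eq_true, if_false, if_true]
        have hF : altBody false (c :: t) = altBody true t := by
          simp only [altBody, hne, hdig, Bool.false_eq_true, if_false, if_true]
        have hR : (lastNotUs (c :: t) && noDD (c :: t) && aDigits (c :: t)) =
            (lastNotUs t && noDD t && aDigits t) := by
          cases t with
          | nil =>
            rw [aDigits_cons c [], contains_all_eq, hdig]
            simp [lastNotUs, noDD, aDigits, hc, bne]
          | cons d t' =>
            rw [show lastNotUs (c :: d :: t') = lastNotUs (d :: t') from rfl,
              aDigits_cons c (d :: t'), contains_all_eq, hdig,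
              show noDD (c :: d :: t') = noDD (d :: t') from by simp [noDD, hne]]
            simp
        refine ⟨by rw [hT, iht, hR], by
          have hb : (c != '_') = true := by simp [hc]
          rw [hF, iht, ← hR]; simp [headNotUs, hb]⟩
      · have hdig' : "01234567".toList.contains c = false := by
          rwa [Bool.not_eq_true] at hdig
        have hall : "01234567_".toList.contains c = false := by
          rw [contains_all_eq, hdig', hne]; rfl
        refine ⟨?_, ?_⟩ <;>
          · rw [aDigits_cons c t, hall]
            simp only [altBody, hne, hdig', Bool.false_eq_true, if_false]
            simp

-- the enumerate loop of A, from position k on, equals the no-double-underscore check,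
-- provided the char before position k is prev and the suffix does not end in '_'
lemma adj_eq (l : List Char) : ∀ (cs : List Char) (k : Nat) (prev : Char),
    1 ≤ k → cs.drop (k - 1) = prev :: l → lastNotUs (prev :: l) = true →
    aAdjLoop cs (PySem.List.enumerate l (k : Int)) = noDD (prev :: l) := by
  induction l with
  | nil => intro cs k prev _ _ _; simp [PySem.List.enumerate_nil, aAdjLoop, noDD]
  | cons c t ih =>
    intro cs k prev hk hdrop hlast
    have hget : ∀ m : Nat, cs[(k - 1) + m]? = (prev :: c :: t)[m]? := by
      intro m; rw [← hdrop, List.getElem?_drop]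
    have hprev : cs[k - 1]? = some prev := by simpa using hget 0
    have hcur : cs[k]? = some c := by
      have := hget 1; rwa [show k - 1 + 1 = k by omega] at this
    have hnext : cs[k + 1]? = t[0]? := by
      have := hget 2; rwa [show k - 1 + 2 = k + 1 by omega] at this
    have hdrop' : cs.drop (k + 1 - 1) = c :: t := by
      rw [show k + 1 - 1 = (k - 1) + 1 by omega, ← List.drop_drop, hdrop]; rfl
    rw [PySem.List.enumerate_cons, aAdjLoop]
    have hidx1 : (k : Int) - 1 = ((k - 1 : Nat) : Int) := by omega
    have hidx2 : (k : Int) + 1 = ((k + 1 : Nat) : Int) := by omega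
    rw [hidx1, hidx2, PySem.List.pyGet?_natCast, PySem.List.pyGet?_natCast, hprev, hnext]
    by_cases hc : c = '_'
    · subst hc
      simp only [beq_self_eq_true, if_true]
      by_cases hp : prev = '_'
      · subst hp; simp [noDD]
      · have hplast : lastNotUs ('_' :: t) = true := by
          rwa [show lastNotUs (prev :: '_' :: t) = lastNotUs ('_' :: t) from rfl] at hlast
        cases t with
        | nil => simp [lastNotUs] at hplast
        | cons d t' =>
          by_cases hd : d = '_'
          · subst hd; simp [noDD, hp]
          · have hrec := ih cs (k + 1) '_' (by omega) hdrop' hplast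
            simp only [List.getElem?_cons_zero, show (some prev == some '_') = false by simp [hp],
              show (some d == some '_') = false by simp [hd], Bool.or_self, Bool.false_eq_true,
              if_false]
            rw [hrec]
            simp [noDD, hp, hd]
    · have hplast : lastNotUs (c :: t) = true := by
        rwa [show lastNotUs (prev :: c :: t) = lastNotUs (c :: t) from rfl] at hlast
      rw [if_neg (by simp [hc])]
      have hrec := ih cs (k + 1) c (by omega) hdrop' hplast
      rw [hrec]
      cases t with
      | nil => simp [noDD, hc]
      | cons d t' => simp [noDD, hc]

-- ===== VERDICT (by name: the statement is the Claim_ definition above) =====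
-- last element of a list as pyGet? at length-1
lemma pyGet_last (cs : List Char) (h : cs ≠ []) :
    PySem.List.pyGet? cs ((cs.length : Int) - 1) = cs.getLast? := by
  have hlen : 1 ≤ cs.length := List.length_pos_iff.mpr h
  have hidx : ((cs.length : Int) - 1) = ((cs.length - 1 : Nat) : Int) := by omega
  rw [hidx, PySem.List.pyGet?_natCast, List.getLast?_eq_getElem?]

-- A's full prefix-and-digits tail, at list level, once the last char is known not to be '_'
lemma check_octal_eq_chain (input : String) (lc : Char) (hlc : input.toList.getLast? = some lc) :
    check_octal input =
      (if lc == '_' then false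
       else if !(aAdjLoop input.toList (PySem.List.enumerate input.toList 0)) then false
       else
         match PySem.List.pyGet? input.toList 0 with
         | none => false
         | some c0 =>
           if c0 == '0' then
             if input.toList.length > 2 then
               match PySem.List.pyGet? input.toList 1 with
               | none => false
               | some c1 =>
                 if "oO".toList.contains c1 then
                   aDigits (PySem.List.slice input.toList (some 2) none)
                 else false
             else false
           else false) := by
  have hne : input.toList ≠ [] := by intro h; rw [h] at hlc; simp at hlc
  simp only [check_octal]
  rw [pyGet_last input.toList hne, hlc]

theorem check_octal_spec : Claim_equal_check_octal := by
  intro input _ hpre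
  unfold Spec_check_octal
  unfold Pre_check_octal at hpre
  obtain ⟨lc, hlc⟩ : ∃ lc, input.toList.getLast? = some lc := by
    cases h : input.toList.getLast? with
    | some a => exact ⟨a, rfl⟩
    | none => exact absurd (List.getLast?_eq_none_iff.mp h) hpre
  rw [check_octal_eq_chain input lc hlc]
  cases hcs : input.toList with
  | nil => exact absurd hcs hpre
  | cons c0 rest =>
  cases rest with
  | nil =>
    -- length-1 string: both sides are false
    have hB : check_octal_alt input = false := by
      simp only [check_octal_alt, hcs]; simp
    rw [hcs] at hlc
    simp only [List.getLast?_singleton, Option.some.injEq] at hlc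
    subst hlc
    rw [hB]
    by_cases hc : c0 = '_'
    · simp [hc]
    · by_cases h0 : c0 = '0' <;>
        simp [hc, h0, aAdjLoop, PySem.List.enumerate_cons, PySem.List.enumerate_nil,
          PySem.List.pyGet?_zero]
  | cons c1 rest =>
  cases rest with
  | nil =>
    -- length-2 string: both sides are false
    have hB : check_octal_alt input = false := by
      simp only [check_octal_alt, hcs]; simp
    rw [hcs] at hlc
    simp only [List.getLast?_cons_cons, List.getLast?_singleton, Option.some.injEq] at hlc
    subst hlc
    rw [hB]
    by_cases h1 : c1 = '_'
    · simp [h1]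
    · have hgm1 : PySem.List.pyGet? [c0, c1] (-1) = some c1 := by
        rw [PySem.List.pyGet?_neg_one]; rfl
      have hg1 : PySem.List.pyGet? [c0, c1] 1 = some c1 := by
        simp [PySem.List.pyGet?, PySem.List.pyIdx?]
      have hg0 : PySem.List.pyGet? [c0, c1] 0 = some c0 := by
        simp [PySem.List.pyGet?_zero]
      by_cases h0c : c0 = '_' <;> by_cases h00 : c0 = '0' <;>
        simp [h1, h0c, h00, aAdjLoop, PySem.List.enumerate_cons, PySem.List.enumerate_nil,
          hgm1, hg1, hg0]
  | cons c2 body =>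
    -- length ≥ 3
    have hlen2 : (c0 :: c1 :: c2 :: body).length > 2 := by simp
    have hlen3 : ¬ (c0 :: c1 :: c2 :: body).length < 3 := by simp
    have hB : check_octal_alt input = (if (c0 != '0') = true then false
        else if (!("oO".toList.contains c1)) = true then false
        else altBody true (c2 :: body)) := by
      simp only [check_octal_alt, hcs]
      rw [if_neg hlen3]
    rw [hcs] at hlc
    have hlc3 : (c2 :: body).getLast? = some lc := by
      rwa [List.getLast?_cons_cons, List.getLast?_cons_cons] at hlc
    have hget0 : PySem.List.pyGet? (c0 :: c1 :: c2 :: body) 0 = some c0 := by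
      simp [PySem.List.pyGet?_zero]
    have hget1 : PySem.List.pyGet? (c0 :: c1 :: c2 :: body) 1 = some c1 := by
      simp [PySem.List.pyGet?, PySem.List.pyIdx?]
      rw [if_pos (by omega)]
      rfl
    rw [hB]
    by_cases h0 : c0 = '0'
    case neg =>
      have hBv : (if (c0 != '0') = true then false
          else if (!"oO".toList.contains c1) = true then false
          else altBody true (c2 :: body)) = false := by simp [h0]
      rw [hBv]
      cases hAdj : aAdjLoop (c0 :: c1 :: c2 :: body)
          (PySem.List.enumerate (c0 :: c1 :: c2 :: body) 0) <;>
        by_cases hLc : lc = '_' <;> simp [hLc, hget0, h0]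
    case pos =>
    subst h0
    by_cases h1 : "oO".toList.contains c1 = true
    case neg =>
      have h1' : "oO".toList.contains c1 = false := by rwa [Bool.not_eq_true] at h1
      have hBv : (if (('0' : Char) != '0') = true then false
          else if (!"oO".toList.contains c1) = true then false
          else altBody true (c2 :: body)) = false := by rw [h1']; simp
      rw [hBv]
      simp only [hget0, hget1]
      rw [h1']
      simp
    case pos =>
    have hc1 : c1 ≠ '_' := by
      intro h; subst h; revert h1; decide
    have hBv : (if (('0' : Char) != '0') = true then false
        else if (!"oO".toList.contains c1) = true then false
        else altBody true (c2 :: body)) = altBody true (c2 :: body) := by rw [h1]; simp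
    rw [hBv]
    by_cases hl : lc = '_'
    case pos =>
      subst hl
      rw [if_pos (show (('_' : Char) == '_') = true from rfl), (altBody_spec (c2 :: body)).1,
        lastNotUs_eq, hlc3]
      simp
    case neg =>
    have hlast : lastNotUs (c2 :: body) = true := by
      rw [lastNotUs_eq, hlc3]; simp [hl]
    have hadj : aAdjLoop ('0' :: c1 :: c2 :: body)
        (PySem.List.enumerate ('0' :: c1 :: c2 :: body) 0) = noDD (c2 :: body) := by
      rw [PySem.List.enumerate_cons, PySem.List.enumerate_cons]
      simp only [aAdjLoop, show (('0' : Char) == '_') = false from rfl,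
        show (c1 == '_') = false from by simp [hc1], Bool.false_eq_true, if_false]
      rw [show ((0 : Int) + 1 + 1) = ((2 : Nat) : Int) from by norm_num]
      rw [adj_eq (c2 :: body) ('0' :: c1 :: c2 :: body) 2 c1 (by omega) rfl
        (by rw [show lastNotUs (c1 :: c2 :: body) = lastNotUs (c2 :: body) from rfl]; exact hlast)]
      simp [noDD, hc1]
    have hslice : PySem.List.slice ('0' :: c1 :: c2 :: body) (some 2) none = c2 :: body := by
      rw [PySem.List.slice_from _ (by norm_num)]
      rfl
    rw [if_neg (by simp [hl]), hadj]
    simp only [hget0, hget1]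
    rw [if_pos h1, hslice, (altBody_spec (c2 :: body)).1, hlast]
    cases hN : noDD (c2 :: body) <;> simp
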